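-- pv_equiv track=rewrite | github.com/artmerinov/unibz_data_profiling | apriori/encoding.py | decode_transaction
-- ===== SOURCE A (Python) =====
-- def decode_transaction(transaction_code, item2code_mapping):
--     """
--     Decode transaction into item names.
--     """
--     decoded_items = []
--
--     while transaction_code:
--         max_match_length = 0
--         matched_item = None
--
--         for item, code in item2code_mapping.items():
--             if transaction_code.startswith(code) and len(code) > max_match_length:
--                 max_match_length = len(code)
--                 matched_item = item
--
--         if matched_item is not None:
--             decoded_items.append(matched_item)
--             transaction_code = transaction_code[max_match_length:]
--         else:
--             # If no match is found, break the loop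
--             break
--
--     return decoded_items
-- ===== SOURCE B (Python) =====
-- def decode_transaction(transaction_code, item2code_mapping):
--     """
--     Decode transaction into item names (dict of codes + descending-length probe).
--     """
--     code2item = {}
--     max_len = 0
--     for item, code in item2code_mapping.items():
--         if code and code not in code2item:
--             code2item[code] = item
--             if len(code) > max_len:
--                 max_len = len(code)
--     decoded_items = []
--     while transaction_code:
--         L = min(max_len, len(transaction_code))
--         while L > 0 and transaction_code[:L] not in code2item:
--             L -= 1
--         if L == 0:
--             break
--         decoded_items.append(code2item[transaction_code[:L]])
--         transaction_code = transaction_code[L:]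
--     return decoded_items
-- ===== Notes on version B (the rewrite author's own statement) =====
-- stated objective: alternative
-- what changed: Instead of rescanning the whole mapping for the longest matching code at every step, B builds a code->item hash map (first occurrence per nonempty code) and the maximal code length once, then at each step probes prefix lengths from max_len downward with dict lookups.
import Mathlib
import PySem

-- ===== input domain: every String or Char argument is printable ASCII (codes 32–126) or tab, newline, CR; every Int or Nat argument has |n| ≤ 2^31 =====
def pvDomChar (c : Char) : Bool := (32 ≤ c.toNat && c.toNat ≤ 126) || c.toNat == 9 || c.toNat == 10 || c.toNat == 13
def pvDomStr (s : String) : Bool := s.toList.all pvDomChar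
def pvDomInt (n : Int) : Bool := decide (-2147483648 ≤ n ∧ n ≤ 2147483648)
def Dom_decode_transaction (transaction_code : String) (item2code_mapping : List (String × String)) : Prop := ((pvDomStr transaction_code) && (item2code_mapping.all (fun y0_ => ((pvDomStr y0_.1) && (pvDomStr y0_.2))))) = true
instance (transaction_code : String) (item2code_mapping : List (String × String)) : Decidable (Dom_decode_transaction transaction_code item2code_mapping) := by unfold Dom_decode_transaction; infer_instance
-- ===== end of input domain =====

-- B replaces A's per-step scan of the whole mapping by a once-built code->item dict plus
-- descending prefix-length probes (objective: alternative algorithm, same results).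

-- ===== PORT A =====
-- inner 'for item, code in item2code_mapping.items()' loop: running (max_match_length, matched_item)
def pvScanA (tc : String) : List (String × String) → Nat × Option String → Nat × Option String
  | [], acc => acc
  | (item, code) :: rest, acc =>
      pvScanA tc rest
        (if PySem.Str.startswith tc code = true ∧ code.toList.length > acc.1
         then (code.toList.length, some item) else acc)

-- the 'while transaction_code:' loop; fuel = len + 1 only makes the recursion structural
def pvLoopA (items : List (String × String)) : Nat → String → List String
  | 0, _ => []
  | fuel + 1, tc =>
      if tc = "" then []
      else
        match pvScanA tc items (0, none) with
        | (maxLen, some item) =>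
            item :: pvLoopA items fuel (PySem.Str.slice tc (some (maxLen : Int)) none)
        | (_, none) => []

def decode_transaction (transaction_code : String) (item2code_mapping : List (String × String)) : List String :=
  pvLoopA (PySem.Dict.ofList item2code_mapping).items (transaction_code.toList.length + 1) transaction_code

-- ===== PORT B =====
-- the 'for item, code in …' build loop: (code2item, max_len)
def pvBuildB : List (String × String) → PySem.Dict String String × Nat → PySem.Dict String String × Nat
  | [], acc => acc
  | (item, code) :: rest, (d, maxLen) =>
      pvBuildB rest
        (if code ≠ "" ∧ d.contains code = false
         then (d.insert code item, if code.toList.length > maxLen then code.toList.length else maxLen)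
         else (d, maxLen))

-- the inner 'while L > 0 and transaction_code[:L] not in code2item: L -= 1' countdown
def pvProbeB (d : PySem.Dict String String) (tc : String) : Nat → Nat
  | 0 => 0
  | L + 1 =>
      if d.contains (PySem.Str.slice tc none (some ((L + 1 : Nat) : Int))) = true then L + 1
      else pvProbeB d tc L

-- the outer 'while transaction_code:' loop; fuel = len + 1 only makes the recursion structural
def pvLoopB (d : PySem.Dict String String) (maxLen : Nat) : Nat → String → List String
  | 0, _ => []
  | fuel + 1, tc =>
      if tc = "" then []
      else
        let L := pvProbeB d tc (min maxLen (tc.toList.length))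
        if L = 0 then []
        else
          match d.get? (PySem.Str.slice tc none (some (L : Int))) with
          | some item => item :: pvLoopB d maxLen fuel (PySem.Str.slice tc (some (L : Int)) none)
          | none => []   -- unreachable: L ≠ 0 means the key is present

def decode_transaction_alt (transaction_code : String) (item2code_mapping : List (String × String)) : List String :=
  let dm := pvBuildB (PySem.Dict.ofList item2code_mapping).items (PySem.Dict.empty, 0)
  pvLoopB dm.1 dm.2 (transaction_code.toList.length + 1) transaction_code

-- ===== PRECONDITION & SPEC =====
def Spec_decode_transaction (transaction_code : String) (item2code_mapping : List (String × String)) (out : List String) : Prop := out = decode_transaction_alt transaction_code item2code_mapping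
instance (transaction_code : String) (item2code_mapping : List (String × String)) (out : List String) : Decidable (Spec_decode_transaction transaction_code item2code_mapping out) := by unfold Spec_decode_transaction; infer_instance

-- ===== CLAIM (what is proved, stated in full; the proofs are below) =====
def Claim_equal_decode_transaction : Prop := ∀ (transaction_code : String) (item2code_mapping : List (String × String)), Dom_decode_transaction transaction_code item2code_mapping → Spec_decode_transaction transaction_code item2code_mapping (decode_transaction transaction_code item2code_mapping)

-- ===== LEMMAS AND PROOFS =====

-- the longest code in l that is a prefix of tc (0 if none)
def pvBest (tc : String) : List (String × String) → Nat
  | [] => 0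
  | p :: rest =>
      if PySem.Str.startswith tc p.2 = true then max (p.2.toList.length) (pvBest tc rest)
      else pvBest tc rest

lemma pvScanA_eq (tc : String) (l : List (String × String)) : ∀ (a : Nat) (o : Option String),
    pvScanA tc l (a, o) =
      if a < pvBest tc l then
        (pvBest tc l,
          (l.find? (fun p => PySem.Str.startswith tc p.2 && (p.2.toList.length == pvBest tc l))).map (·.1))
      else (a, o) := by
  induction l with
  | nil => intro a o; simp [pvScanA, pvBest]
  | cons p rest ih =>
    intro a o
    obtain ⟨item, code⟩ := p
    by_cases hs : PySem.Str.startswith tc code = true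
    · have hbest : pvBest tc ((item, code) :: rest)
          = max code.toList.length (pvBest tc rest) := by
        simp only [pvBest]; rw [if_pos hs]
      by_cases hgt : code.toList.length > a
      · have h1 : pvScanA tc ((item, code) :: rest) (a, o)
            = pvScanA tc rest (code.toList.length, some item) := by
          simp only [pvScanA]; rw [if_pos ⟨hs, hgt⟩]
        rw [h1, ih, hbest]
        by_cases h2 : code.toList.length < pvBest tc rest
        · have hmax : max code.toList.length (pvBest tc rest) = pvBest tc rest := by omega
          rw [if_pos h2, hmax, if_pos (by omega)]
          have hne : ¬ ((fun p => PySem.Str.startswith tc p.2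
              && (p.2.toList.length == pvBest tc rest)) (item, code) = true) := by
            simp only [hs, Bool.true_and, beq_iff_eq]; omega
          rw [List.find?_cons_of_neg (p := fun p => PySem.Str.startswith tc p.2
            && (p.2.toList.length == pvBest tc rest)) (a := (item, code)) hne]
        · have hmax : max code.toList.length (pvBest tc rest) = code.toList.length := by omega
          rw [if_neg h2, if_pos (show a < max code.toList.length (pvBest tc rest) by omega)]
          have hpos : ((fun p => PySem.Str.startswith tc p.2
              && (p.2.toList.length == max code.toList.length (pvBest tc rest))) (item, code) = true) := by
            simp only [hs, Bool.true_and, beq_iff_eq]; omega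
          rw [List.find?_cons_of_pos (p := fun p => PySem.Str.startswith tc p.2
            && (p.2.toList.length == max code.toList.length (pvBest tc rest))) (a := (item, code)) hpos]
          rw [hmax]
          rfl
      · have h1 : pvScanA tc ((item, code) :: rest) (a, o) = pvScanA tc rest (a, o) := by
          simp only [pvScanA]
          rw [if_neg (by intro hc; exact hgt hc.2)]
        rw [h1, ih, hbest]
        by_cases h2 : a < pvBest tc rest
        · have hmax : max code.toList.length (pvBest tc rest) = pvBest tc rest := by omega
          rw [if_pos h2, if_pos (by omega), hmax]
          have hne : ¬ ((fun p => PySem.Str.startswith tc p.2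
              && (p.2.toList.length == pvBest tc rest)) (item, code) = true) := by
            simp only [hs, Bool.true_and, beq_iff_eq]; omega
          rw [List.find?_cons_of_neg (p := fun p => PySem.Str.startswith tc p.2
            && (p.2.toList.length == pvBest tc rest)) (a := (item, code)) hne]
        · rw [if_neg h2, if_neg (by omega)]
    · have hs' : PySem.Str.startswith tc code = false := by
        revert hs; cases PySem.Str.startswith tc code <;> simp
      have hbest : pvBest tc ((item, code) :: rest) = pvBest tc rest := by
        simp only [pvBest]; rw [if_neg hs]
      have h1 : pvScanA tc ((item, code) :: rest) (a, o) = pvScanA tc rest (a, o) := by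
        simp only [pvScanA]
        rw [if_neg (by intro hc; exact hs hc.1)]
      rw [h1, ih, hbest]
      have hne : ¬ ((fun p => PySem.Str.startswith tc p.2
          && (p.2.toList.length == pvBest tc rest)) (item, code) = true) := by
        simp only [hs', Bool.false_and]; simp
      rw [List.find?_cons_of_neg (p := fun p => PySem.Str.startswith tc p.2
        && (p.2.toList.length == pvBest tc rest)) (a := (item, code)) hne]

lemma le_pvBest (tc : String) (l : List (String × String)) (p : String × String)
    (hp : p ∈ l) (hs : PySem.Str.startswith tc p.2 = true) : p.2.toList.length ≤ pvBest tc l := by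
  induction l with
  | nil => cases hp
  | cons q rest ih =>
    rcases List.mem_cons.mp hp with h | h
    · subst h
      simp only [pvBest]; rw [if_pos hs]; omega
    · have hle := ih h
      by_cases hq : PySem.Str.startswith tc q.2 = true
      · simp only [pvBest]; rw [if_pos hq]; omega
      · simp only [pvBest]; rw [if_neg hq]; omega

lemma pvBest_attained (tc : String) (l : List (String × String)) (h : pvBest tc l ≠ 0) :
    ∃ p ∈ l, PySem.Str.startswith tc p.2 = true ∧ p.2.toList.length = pvBest tc l := by
  induction l with
  | nil => simp [pvBest] at h
  | cons q rest ih =>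
    by_cases hq : PySem.Str.startswith tc q.2 = true
    · have hbest : pvBest tc (q :: rest) = max q.2.toList.length (pvBest tc rest) := by
        simp only [pvBest]; rw [if_pos hq]
      by_cases h2 : q.2.toList.length < pvBest tc rest
      · obtain ⟨p, hp, hps, hpl⟩ := ih (by omega)
        exact ⟨p, List.mem_cons_of_mem _ hp, hps, by rw [hbest]; omega⟩
      · exact ⟨q, List.mem_cons_self, hq, by rw [hbest]; omega⟩
    · have hbest : pvBest tc (q :: rest) = pvBest tc rest := by
        simp only [pvBest]; rw [if_neg hq]
      rw [hbest] at h ⊢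
      obtain ⟨p, hp, hps, hpl⟩ := ih h
      exact ⟨p, List.mem_cons_of_mem _ hp, hps, hpl⟩

lemma pvBuildB_spec (l : List (String × String)) : ∀ (d : PySem.Dict String String) (M : Nat),
    (∀ k v, d.get? k = some v → k.toList.length ≤ M ∧ k ≠ "") →
    (∀ k, ((pvBuildB l (d, M)).1).get? k =
        (if (d.get? k).isSome then d.get? k
         else if k = "" then none
         else (l.find? (fun p => p.2 == k)).map (·.1)))
    ∧ M ≤ (pvBuildB l (d, M)).2
    ∧ (∀ k v, ((pvBuildB l (d, M)).1).get? k = some v →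
        k.toList.length ≤ (pvBuildB l (d, M)).2 ∧ k ≠ "") := by
  induction l with
  | nil =>
    intro d M hd
    refine ⟨fun k => ?_, le_refl _, fun k v h => hd k v h⟩
    simp only [pvBuildB, List.find?_nil, Option.map_none]
    cases h : d.get? k with
    | some v =>
      simp
    | none =>
      simp
  | cons p rest ih =>
    intro d M hd
    obtain ⟨item, code⟩ := p
    by_cases hc : code ≠ "" ∧ d.contains code = false
    · have hstep : pvBuildB ((item, code) :: rest) (d, M)
          = pvBuildB rest (d.insert code item,
              if code.toList.length > M then code.toList.length else M) := by
        simp [pvBuildB, hc]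
      set M' := if code.toList.length > M then code.toList.length else M with hM'
      have hd' : ∀ k v, (d.insert code item).get? k = some v → k.toList.length ≤ M' ∧ k ≠ "" := by
        intro k v hk
        by_cases hke : k = code
        · subst hke
          refine ⟨by rw [hM']; split <;> omega, hc.1⟩
        · rw [PySem.Dict.get?_insert_of_ne _ _ hke] at hk
          obtain ⟨h1, h2⟩ := hd k v hk
          exact ⟨by rw [hM']; split <;> omega, h2⟩
      obtain ⟨ih1, ih2, ih3⟩ := ih (d.insert code item) M' hd'
      rw [hstep]
      refine ⟨fun k => ?_, le_trans (by rw [hM']; split <;> omega) ih2, ih3⟩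
      rw [ih1 k]
      by_cases hke : k = code
      · subst hke
        have hdnone : d.get? k = none := by
          have := PySem.Dict.contains_eq_isSome_get? d k
          rw [hc.2] at this
          cases h : d.get? k with
          | some v => rw [h] at this; simp at this
          | none => rfl
        rw [PySem.Dict.get?_insert_self, hdnone]
        simp only [Option.isSome_some, Option.isSome_none, if_true, Bool.false_eq_true, if_false]
        rw [if_neg hc.1]
        simp
      · rw [PySem.Dict.get?_insert_of_ne _ _ hke]
        cases h : d.get? k with
        | some v => simp
        | none =>
          simp only [Option.isSome_none, Bool.false_eq_true, if_false]
          by_cases hke'' : k = ""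
          · simp [hke'']
          · rw [if_neg hke'', if_neg hke'']
            have hne : (code == k) = false := by
              simp only [beq_eq_false_iff_ne]
              exact fun hh => hke hh.symm
            simp only [List.find?_cons, hne]
    · have hstep : pvBuildB ((item, code) :: rest) (d, M) = pvBuildB rest (d, M) := by
        simp only [pvBuildB]
        rw [if_neg hc]
      obtain ⟨ih1, ih2, ih3⟩ := ih d M hd
      rw [hstep]
      refine ⟨fun k => ?_, ih2, ih3⟩
      rw [ih1 k]
      by_cases hcode : code = ""
      · subst hcode
        cases h : d.get? k with
        | some v => simp
        | none =>
          simp only [Option.isSome_none, Bool.false_eq_true, if_false]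
          by_cases hke : k = ""
          · simp [hke]
          · rw [if_neg hke, if_neg hke]
            have hne : (("" : String) == k) = false := by
              simp only [beq_eq_false_iff_ne]
              exact fun hh => hke hh.symm
            simp only [List.find?_cons, hne]
      · have hcont : d.contains code = true := by
          rcases not_and_or.mp hc with h | h
          · exact absurd (not_not.mp h) hcode
          · cases hcc : d.contains code with
            | true => rfl
            | false => exact absurd hcc h
        have hsome : (d.get? code).isSome := by
          rw [← PySem.Dict.contains_eq_isSome_get?, hcont]
        by_cases hke : k = code
        · subst hke
          simp [hsome]
        · cases h : d.get? k with
          | some v => simp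
          | none =>
            simp only [Option.isSome_none, Bool.false_eq_true, if_false]
            by_cases hke'' : k = ""
            · simp [hke'']
            · rw [if_neg hke'', if_neg hke'']
              have hne : (code == k) = false := by
                simp only [beq_eq_false_iff_ne]
                exact fun hh => hke hh.symm
              simp only [List.find?_cons, hne]

lemma pvProbeB_max (d : PySem.Dict String String) (tc : String) (B : Nat) : ∀ (k : Nat), B ≤ k →
    (B ≠ 0 → d.contains (PySem.Str.slice tc none (some (B : Int))) = true) →
    (∀ j, B < j → j ≤ k → d.contains (PySem.Str.slice tc none (some (j : Int))) = false) →
    pvProbeB d tc k = B := by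
  intro k
  induction k with
  | zero =>
    intro hB _ _
    have hB0 : B = 0 := by omega
    subst hB0
    rfl
  | succ n ihn =>
    intro hB hQ hF
    by_cases hQk : d.contains (PySem.Str.slice tc none (some ((n + 1 : Nat) : Int))) = true
    · have hBk : B = n + 1 := by
        by_contra hne
        have hlt : B < n + 1 := by omega
        rw [hF (n + 1) hlt (le_refl _)] at hQk
        cases hQk
      simp only [pvProbeB]
      rw [if_pos hQk, hBk]
    · have hBn : B ≤ n := by
        by_contra hgt
        have : B = n + 1 := by omega
        subst this
        exact hQk (hQ (by omega))
      simp only [pvProbeB]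
      rw [if_neg hQk]
      exact ihn hBn hQ (fun j h1 h2 => hF j h1 (by omega))

lemma pvFind?_congr {α : Type} (l : List α) (p q : α → Bool) (h : ∀ x ∈ l, p x = q x) :
    l.find? p = l.find? q := by
  induction l with
  | nil => rfl
  | cons x xs ih =>
    simp only [List.find?_cons, h x (List.mem_cons_self)]
    cases q x with
    | true => rfl
    | false => exact ih (fun y hy => h y (List.mem_cons_of_mem _ hy))

lemma pvStartswith_iff (s p : String) : PySem.Str.startswith s p = true ↔ p.toList <+: s.toList := by
  rw [PySem.Str.startswith_eq]; exact PySem.Chars.startswith_iff _ _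

lemma pvLoop_eq (l : List (String × String)) :
    ∀ (fuel : Nat) (tc : String),
      pvLoopA l fuel tc =
        pvLoopB (pvBuildB l (PySem.Dict.empty, 0)).1 (pvBuildB l (PySem.Dict.empty, 0)).2 fuel tc := by
  obtain ⟨hget, -, hkey⟩ := pvBuildB_spec l PySem.Dict.empty 0
    (by intro k v h; rw [PySem.Dict.get?_empty] at h; cases h)
  set d := (pvBuildB l (PySem.Dict.empty, 0)).1 with hd
  set M := (pvBuildB l (PySem.Dict.empty, 0)).2 with hM
  have hget' : ∀ k, k ≠ "" → d.get? k = (l.find? (fun p => p.2 == k)).map (·.1) := by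
    intro k hk
    rw [hget k]
    simp [PySem.Dict.get?_empty, hk]
  intro fuel
  induction fuel with
  | zero => intro tc; rfl
  | succ n ih =>
    intro tc
    by_cases htc : tc = ""
    · subst htc; simp [pvLoopA, pvLoopB]
    · have hslice : ∀ j : Nat,
          (PySem.Str.slice tc none (some (j : Int))).toList = tc.toList.take j := by
        intro j; simp [pysem]
      -- characterization of membership of a prefix-slice key in the dict
      have hiff : ∀ (j : Nat), 1 ≤ j → j ≤ tc.toList.length → ∀ (x : String × String),
          x.2 = PySem.Str.slice tc none (some (j : Int)) ↔
            (PySem.Str.startswith tc x.2 = true ∧ x.2.toList.length = j) := by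
        intro j h1 h2 x
        constructor
        · intro hx
          constructor
          · apply (pvStartswith_iff tc x.2).mpr
            rw [hx, hslice]
            exact List.take_prefix _ _
          · rw [hx, hslice, List.length_take]; omega
        · rintro ⟨hxs, hxl⟩
          have hpre : x.2.toList <+: tc.toList := (pvStartswith_iff tc x.2).mp hxs
          apply String.toList_inj.mp
          rw [hslice, List.prefix_iff_eq_take.mp hpre, hxl]
      have hcontains : ∀ j : Nat, 1 ≤ j → j ≤ tc.toList.length →
          (d.contains (PySem.Str.slice tc none (some (j : Int))) = true ↔
            ∃ p ∈ l, PySem.Str.startswith tc p.2 = true ∧ p.2.toList.length = j) := by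
        intro j h1 h2
        have hsl_ne : PySem.Str.slice tc none (some (j : Int)) ≠ "" := by
          intro h
          have h3 : (tc.toList.take j).length = j := by rw [List.length_take]; omega
          rw [← hslice j, h] at h3
          simp at h3
          omega
        rw [PySem.Dict.contains_eq_isSome_get?, hget' _ hsl_ne, Option.isSome_map,
          List.find?_isSome]
        constructor
        · rintro ⟨p, hp, hpe⟩
          exact ⟨p, hp, (hiff j h1 h2 p).mp (by simpa using hpe)⟩
        · rintro ⟨p, hp, hps, hpl⟩
          exact ⟨p, hp, by simpa using (hiff j h1 h2 p).mpr ⟨hps, hpl⟩⟩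
      have hQfalse : ∀ j, pvBest tc l < j → j ≤ min M tc.toList.length →
          d.contains (PySem.Str.slice tc none (some (j : Int))) = false := by
        intro j hj1 hj2
        cases hcc : d.contains (PySem.Str.slice tc none (some (j : Int))) with
        | false => rfl
        | true =>
          obtain ⟨p, hp, hps, hpl⟩ := (hcontains j (by omega) (by omega)).mp hcc
          have := le_pvBest tc l p hp hps
          omega
      by_cases hB : pvBest tc l = 0
      · -- no match: both stop
        have hprobe : pvProbeB d tc (min M tc.toList.length) = 0 :=
          pvProbeB_max d tc 0 _ (by omega) (fun h => absurd rfl h)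
            (fun j h1 h2 => hQfalse j (by omega) h2)
        simp only [pvLoopA, pvLoopB]
        rw [if_neg htc, if_neg htc, pvScanA_eq, if_neg (by omega), hprobe]
        simp
      · -- a match of length pvBest exists
        obtain ⟨p0, hp0, hp0s, hp0l⟩ := pvBest_attained tc l hB
        have hBtc : pvBest tc l ≤ tc.toList.length := by
          have := ((pvStartswith_iff tc p0.2).mp hp0s).length_le
          omega
        have hp0ne : p0.2 ≠ "" := by
          intro h; rw [h] at hp0l; simp at hp0l; omega
        have hfind0 : (l.find? (fun p => p.2 == p0.2)).isSome :=
          List.find?_isSome.mpr ⟨p0, hp0, by simp⟩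
        have hBM : pvBest tc l ≤ M := by
          obtain ⟨q, hq⟩ := Option.isSome_iff_exists.mp hfind0
          have hg : d.get? p0.2 = some q.1 := by rw [hget' _ hp0ne, hq]; rfl
          have := (hkey _ _ hg).1
          omega
        have hQB : d.contains (PySem.Str.slice tc none (some ((pvBest tc l : Nat) : Int))) = true :=
          (hcontains _ (by omega) hBtc).mpr ⟨p0, hp0, hp0s, hp0l⟩
        have hprobe : pvProbeB d tc (min M tc.toList.length) = pvBest tc l :=
          pvProbeB_max d tc _ _ (by omega) (fun _ => hQB) hQfalse
        have hfcongr : l.find? (fun p => p.2 == PySem.Str.slice tc none (some ((pvBest tc l : Nat) : Int)))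
            = l.find? (fun p => PySem.Str.startswith tc p.2 && (p.2.toList.length == pvBest tc l)) := by
          apply pvFind?_congr
          intro x _
          by_cases hx2 : x.2 = PySem.Str.slice tc none (some ((pvBest tc l : Nat) : Int))
          · have hx3 := (hiff _ (by omega) hBtc x).mp hx2
            have hL : (x.2 == PySem.Str.slice tc none (some ((pvBest tc l : Nat) : Int))) = true := by
              simp [hx2]
            rw [hL, hx3.1]
            simp [hx3.2]
          · have hx3 : ¬ (PySem.Str.startswith tc x.2 = true ∧ x.2.toList.length = pvBest tc l) :=
              fun hc => hx2 ((hiff _ (by omega) hBtc x).mpr hc)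
            have hL : (x.2 == PySem.Str.slice tc none (some ((pvBest tc l : Nat) : Int))) = false := by
              simp [hx2]
            rw [hL]
            cases hsw : PySem.Str.startswith tc x.2 with
            | false => simp
            | true =>
              have hlen : (x.2.toList.length == pvBest tc l) = false :=
                beq_eq_false_iff_ne.mpr (fun h => hx3 ⟨hsw, h⟩)
              simp only [Bool.true_and]
              exact hlen.symm
        have hfindB : (l.find? (fun p => PySem.Str.startswith tc p.2
            && (p.2.toList.length == pvBest tc l))).isSome :=
          List.find?_isSome.mpr ⟨p0, hp0, by rw [hp0s, Bool.true_and, beq_iff_eq]; exact hp0l⟩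
        obtain ⟨q, hq⟩ := Option.isSome_iff_exists.mp hfindB
        have hgetB : d.get? (PySem.Str.slice tc none (some ((pvBest tc l : Nat) : Int)))
            = some q.1 := by
          have hsl_ne : PySem.Str.slice tc none (some ((pvBest tc l : Nat) : Int)) ≠ "" := by
            intro h
            have h3 : (tc.toList.take (pvBest tc l)).length = pvBest tc l := by
              rw [List.length_take]; omega
            rw [← hslice, h] at h3
            simp at h3
            omega
          rw [hget' _ hsl_ne, hfcongr, hq]
          rfl
        -- assemble the step on both sides
        simp only [pvLoopA, pvLoopB]
        rw [if_neg htc, if_neg htc, pvScanA_eq, if_pos (by omega : 0 < pvBest tc l), hq, hprobe]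
        rw [if_neg hB, hgetB]
        simp only [Option.map_some]
        exact congrArg _ (ih _)

-- ===== VERDICT (by name: the statement is the Claim_ definition above) =====
theorem decode_transaction_spec : Claim_equal_decode_transaction := by
  intro tc m _
  unfold Spec_decode_transaction decode_transaction decode_transaction_alt
  exact pvLoop_eq _ _ _
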